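-- pv_equiv track=rewrite | github.com/KeshiKiD03/ServiciosRed-m08 | m03-programacio-master/m03-programacio-master/Programas/Funciones/funciones_4.py | binari_decimal
-- ===== SOURCE A (Python) =====
-- def binari_decimal(ip_valid):
--     '''
--     Funcio que calcula una cadena binaria a decimal
--     input: 1 cadena de 35 digits (Cada 8 digits 1 punt)
--     output: 1 cadena de 4 digits separats en punts
--     '''
--     bit = 7
--     ip_casi_final = 0
--     ip_final = ''
--
--     for i in ip_valid:
--
--         # Mirem si el caracter es 0 o 1
--         if i == '1' or i == '0':
--
--             # Fem la conversio a decimal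
--             ip_valid = 2 ** bit *int(i)
--
--             # Guardem el resultat a una variable temporal
--             ip_casi_final = ip_valid + ip_casi_final
--
--             # Pasem el següent bit
--             bit -=1
--
--         # Si es punt
--         else:
--             # Convertim el resultat a un string i posem un punt
--             ip_casi_final = str(ip_casi_final) + '.'
--
--             # Guardem el resultat a la variable final
--             ip_final = ip_final + ip_casi_final
--
--             # Buidem la variable temporal per poder sumar
--             ip_casi_final = 0
--
--             # Tornem el seté bit per tornar a calcular
--             bit = 7
--
--     # Juntem l'ultim camp amb la variable final
--     ip_final = ip_final + str(ip_casi_final)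
--
--     return ip_final
-- ===== SOURCE B (Python) =====
-- def binari_decimal(ip_valid):
--     # Split into groups of binary digits (any other character separates groups),
--     # then render each group as the decimal value of an 8-bit octet whose bit i
--     # carries weight 2**(7-i), joined with dots.
--     groups = []
--     cur = ''
--     for ch in ip_valid:
--         if ch in '01':
--             cur += ch
--         else:
--             groups.append(cur)
--             cur = ''
--     groups.append(cur)
--     return '.'.join(str(sum(int(c) * 2 ** (7 - i) for i, c in enumerate(g)))
--                     for g in groups)
-- ===== Notes on version B (the rewrite author's own statement) =====
-- stated objective: alternative
-- what changed: B replaces A's single pass with a running bit counter, accumulator and repeated string concatenation by a split-into-binary-groups pass followed by a per-group bit-weight sum and one dot-join; Pre_ excludes inputs with a run of more than 8 binary digits, where both programs return float-formatted strings that have no Int port.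
-- outside the precondition, e.g. on binari_decimal('111111111'): A returns '255.5', B returns '255.5'; on binari_decimal('100000000'): A returns '128.0', B returns '128.0'
import Mathlib
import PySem

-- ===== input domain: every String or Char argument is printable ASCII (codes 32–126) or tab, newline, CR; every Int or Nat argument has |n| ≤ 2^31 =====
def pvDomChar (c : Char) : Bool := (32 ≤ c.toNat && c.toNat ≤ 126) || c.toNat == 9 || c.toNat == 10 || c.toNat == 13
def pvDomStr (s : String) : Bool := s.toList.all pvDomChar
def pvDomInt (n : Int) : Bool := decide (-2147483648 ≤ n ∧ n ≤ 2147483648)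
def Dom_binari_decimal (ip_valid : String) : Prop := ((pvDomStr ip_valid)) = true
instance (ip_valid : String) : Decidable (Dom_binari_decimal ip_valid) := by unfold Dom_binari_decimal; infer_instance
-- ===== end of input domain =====

-- B converts dotted-binary to dotted-decimal by splitting into binary-digit groups and
-- rendering each group as an octet value by its bit weights, then joining with dots — a
-- split/convert/join decomposition instead of A's single pass with running bit counter.

-- ===== PORT A =====
-- state = (bit, ip_casi_final, ip_final); int(i) for i ∈ {'0','1'} is (if i = '1' then 1 else 0);
-- 2 ** bit is 2 ^ bit.toNat — exact whenever bit ≥ 0, which Pre_ guarantees (on longer binary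
-- runs Python's 2 ** bit with bit < 0 is a float, excluded below).
def binari_decimal (ip_valid : String) : String :=
  let step := fun (st : Int × Int × List Char) (i : Char) =>
    if i = '1' ∨ i = '0' then
      (st.1 - 1, 2 ^ st.1.toNat * (if i = '1' then (1 : Int) else 0) + st.2.1, st.2.2)
    else
      ((7 : Int), (0 : Int), st.2.2 ++ PySem.Int.toChars st.2.1 ++ ['.'])
  let r := ip_valid.toList.foldl step (7, 0, [])
  String.ofList (r.2.2 ++ PySem.Int.toChars r.2.1)

-- ===== PORT B =====
-- sum(int(c) * 2 ** (7 - i) for i, c in enumerate(g)): exact whenever every index i ≤ 7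
-- (guaranteed by Pre_; for i > 7 Python's 2 ** (7 - i) is a float, excluded below).
def gsum (g : List Char) : Int :=
  (PySem.List.enumerate g).foldl
    (fun a p => a + (if p.2 = '1' then (1 : Int) else 0) * 2 ^ (7 - p.1).toNat) 0

-- ch in '01' is (ch = '0' ∨ ch = '1')
def binari_decimal_alt (ip_valid : String) : String :=
  let step := fun (st : List (List Char) × List Char) (ch : Char) =>
    if ch = '0' ∨ ch = '1' then (st.1, st.2 ++ [ch]) else (st.1 ++ [st.2], [])
  let r := ip_valid.toList.foldl step ([], [])
  let groups := r.1 ++ [r.2]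
  String.ofList (PySem.Chars.join ['.'] (groups.map fun g => PySem.Int.toChars (gsum g)))

-- ===== PRECONDITION & SPEC =====
-- helper for Pre_: the maximal groups of consecutive binary digits of a string
-- (other characters are separators; consecutive separators yield empty groups).
def splitTokens (cur : List Char) : List Char → List (List Char)
  | [] => [cur]
  | c :: t => if c = '0' ∨ c = '1' then splitTokens (cur ++ [c]) t else cur :: splitTokens [] t

-- Pre_ excludes inputs containing a run of more than 8 consecutive binary digits: there both
-- programs mix Python float arithmetic (2 ** negative) into the returned string, which has no
-- Int port; A and B still return the same string on those inputs.
def Pre_binari_decimal (ip_valid : String) : Prop :=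
  ∀ g ∈ splitTokens [] ip_valid.toList, g.length ≤ 8
instance (ip_valid : String) : Decidable (Pre_binari_decimal ip_valid) := by
  unfold Pre_binari_decimal; infer_instance

def pvWitness_binari_decimal : String := "11000000.10101000"

def Spec_binari_decimal (ip_valid : String) (out : String) : Prop := out = binari_decimal_alt ip_valid
instance (ip_valid : String) (out : String) : Decidable (Spec_binari_decimal ip_valid out) := by unfold Spec_binari_decimal; infer_instance

-- ===== CLAIM (what is proved, stated in full; the proofs are below) =====
def Claim_equal_binari_decimal : Prop := ∀ (ip_valid : String), Dom_binari_decimal ip_valid → Pre_binari_decimal ip_valid → Spec_binari_decimal ip_valid (binari_decimal ip_valid)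

-- ===== LEMMAS AND PROOFS =====

-- named copies of the two fold bodies (syntactically identical to the lambdas in the ports)
def astep (st : Int × Int × List Char) (i : Char) : Int × Int × List Char :=
  if i = '1' ∨ i = '0' then
    (st.1 - 1, 2 ^ st.1.toNat * (if i = '1' then (1 : Int) else 0) + st.2.1, st.2.2)
  else
    ((7 : Int), (0 : Int), st.2.2 ++ PySem.Int.toChars st.2.1 ++ ['.'])

def bstep (st : List (List Char) × List Char) (ch : Char) : List (List Char) × List Char :=
  if ch = '0' ∨ ch = '1' then (st.1, st.2 ++ [ch]) else (st.1 ++ [st.2], [])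

lemma A_unfold (ip : String) :
    binari_decimal ip
      = String.ofList ((ip.toList.foldl astep (7, 0, [])).2.2
          ++ PySem.Int.toChars (ip.toList.foldl astep (7, 0, [])).2.1) := rfl

lemma B_unfold (ip : String) :
    binari_decimal_alt ip
      = String.ofList (PySem.Chars.join ['.']
          (((ip.toList.foldl bstep ([], [])).1 ++ [(ip.toList.foldl bstep ([], [])).2]).map
            fun g => PySem.Int.toChars (gsum g))) := rfl

lemma gsum_append (g : List Char) (c : Char) :
    gsum (g ++ [c]) = gsum g + (if c = '1' then (1 : Int) else 0) * 2 ^ (7 - g.length) := by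
  unfold gsum
  rw [PySem.List.enumerate_append, List.foldl_append]
  simp [PySem.List.enumerate]

lemma splitTokens_cons (cur : List Char) (c : Char) (t : List Char) :
    splitTokens cur (c :: t)
      = if c = '0' ∨ c = '1' then splitTokens (cur ++ [c]) t else cur :: splitTokens [] t := rfl

lemma splitTokens_ne_nil (s : List Char) : ∀ cur, splitTokens cur s ≠ [] := by
  induction s with
  | nil => intro cur; simp [splitTokens]
  | cons c t ih =>
    intro cur
    rw [splitTokens_cons]
    split
    · exact ih (cur ++ [c])
    · simp

lemma splitTokens_head_len (s : List Char) : ∀ cur, cur.length ≤ ((splitTokens cur s).headI).length := by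
  induction s with
  | nil => intro cur; simp [splitTokens]
  | cons c t ih =>
    intro cur
    rw [splitTokens_cons]
    split
    · have := ih (cur ++ [c])
      simp only [List.length_append, List.length_singleton] at this
      omega
    · simp

lemma splitTokens_head_mem (s cur : List Char) : (splitTokens cur s).headI ∈ splitTokens cur s := by
  cases hs : splitTokens cur s with
  | nil => exact absurd hs (splitTokens_ne_nil s cur)
  | cons a l => simp

-- join with "." : cons with a nonempty tail prepends "x."
lemma join_dot_cons_cons (x y : List Char) (l : List (List Char)) :
    PySem.Chars.join ['.'] (x :: y :: l) = x ++ ['.'] ++ PySem.Chars.join ['.'] (y :: l) := by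
  simpa using PySem.Chars.join_cons_cons ['.'] x y l

-- A's loop, started after a consumed group prefix `cur`, produces exactly B's rendering
-- of the remaining groups.
lemma A_loop (s : List Char) : ∀ (cur fin : List Char),
    (∀ g ∈ splitTokens cur s, g.length ≤ 8) →
    (s.foldl astep ((7 : Int) - cur.length, gsum cur, fin)).2.2
        ++ PySem.Int.toChars (s.foldl astep ((7 : Int) - cur.length, gsum cur, fin)).2.1
      = fin ++ PySem.Chars.join ['.'] ((splitTokens cur s).map fun g => PySem.Int.toChars (gsum g)) := by
  induction s with
  | nil =>
    intro cur fin _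
    simp [splitTokens, PySem.Chars.join_singleton]
  | cons c t ih =>
    intro cur fin hlen
    by_cases hc : c = '0' ∨ c = '1'
    · -- binary character: extend the current group
      have hc' : c = '1' ∨ c = '0' := hc.symm
      have hsplit : splitTokens cur (c :: t) = splitTokens (cur ++ [c]) t := by
        rw [splitTokens_cons, if_pos hc]
      -- cur ++ [c] is a prefix of the head group of what remains, which Pre_ bounds by 8
      have hmem := splitTokens_head_mem t (cur ++ [c])
      have hhead := splitTokens_head_len t (cur ++ [c])
      simp only [List.length_append, List.length_singleton] at hhead
      have h8 : ((splitTokens (cur ++ [c]) t).headI).length ≤ 8 :=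
        hlen _ (hsplit ▸ hmem)
      have hle : cur.length + 1 ≤ 8 := by omega
      have hstep : astep ((7 : Int) - cur.length, gsum cur, fin) c
          = ((7 : Int) - ((cur ++ [c]).length : Int), gsum (cur ++ [c]), fin) := by
        unfold astep
        rw [if_pos hc']
        have hbit : ((7 : Int) - (cur.length : Int)).toNat = 7 - cur.length := by omega
        have hacc : 2 ^ ((7 : Int) - (cur.length : Int)).toNat * (if c = '1' then (1 : Int) else 0)
              + gsum cur = gsum (cur ++ [c]) := by
          rw [hbit, gsum_append]
          ring
        have hbit' : (7 : Int) - (cur.length : Int) - 1 = 7 - (((cur ++ [c]).length : Nat) : Int) := by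
          simp only [List.length_append, List.length_singleton]
          push_cast
          ring
        simp only [hacc, hbit']
      rw [List.foldl_cons, hstep, hsplit]
      exact ih (cur ++ [c]) fin (hsplit ▸ hlen)
    · -- separator: flush the current group
      have hc' : ¬ (c = '1' ∨ c = '0') := fun h => hc h.symm
      have hsplit : splitTokens cur (c :: t) = cur :: splitTokens [] t := by
        rw [splitTokens_cons, if_neg hc]
      have hstep : astep ((7 : Int) - cur.length, gsum cur, fin) c
          = ((7 : Int) - (([] : List Char).length : Int), gsum ([] : List Char),
              fin ++ PySem.Int.toChars (gsum cur) ++ ['.']) := by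
        unfold astep
        rw [if_neg hc']
        have : gsum ([] : List Char) = 0 := by decide
        simp [this]
      have hlen' : ∀ g ∈ splitTokens ([] : List Char) t, g.length ≤ 8 := by
        intro g hg; exact hlen g (by rw [hsplit]; exact List.mem_cons_of_mem _ hg)
      rw [List.foldl_cons, hstep, hsplit,
        ih [] (fin ++ PySem.Int.toChars (gsum cur) ++ ['.']) hlen']
      obtain ⟨g, gs, hgs⟩ : ∃ g gs, splitTokens ([] : List Char) t = g :: gs := by
        cases h : splitTokens ([] : List Char) t with
        | nil => exact absurd h (splitTokens_ne_nil t [])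
        | cons a l => exact ⟨a, l, rfl⟩
      rw [hgs]
      conv_rhs => rw [List.map_cons, List.map_cons, join_dot_cons_cons]
      simp [List.append_assoc]

-- B's splitting fold computes splitTokens
lemma B_split (s : List Char) : ∀ (gs : List (List Char)) (cur : List Char),
    (s.foldl bstep (gs, cur)).1 ++ [(s.foldl bstep (gs, cur)).2] = gs ++ splitTokens cur s := by
  induction s with
  | nil => intro gs cur; simp [splitTokens]
  | cons c t ih =>
    intro gs cur
    by_cases hc : c = '0' ∨ c = '1'
    · rw [List.foldl_cons, show bstep (gs, cur) c = (gs, cur ++ [c]) from by unfold bstep; rw [if_pos hc],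
        ih gs (cur ++ [c]), splitTokens_cons, if_pos hc]
    · rw [List.foldl_cons, show bstep (gs, cur) c = (gs ++ [cur], []) from by unfold bstep; rw [if_neg hc],
        ih (gs ++ [cur]) [], splitTokens_cons, if_neg hc]
      simp

-- ===== VERDICT (by name: the statement is the Claim_ definition above) =====
theorem binari_decimal_spec : Claim_equal_binari_decimal := by
  intro ip _ hpre
  unfold Spec_binari_decimal
  rw [A_unfold, B_unfold]
  have hB := B_split ip.toList [] []
  simp only [List.nil_append] at hB
  rw [hB]
  have hA := A_loop ip.toList [] [] hpre
  have h0 : gsum ([] : List Char) = 0 := by decide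
  rw [h0] at hA
  simp only [List.length_nil, Nat.cast_zero, sub_zero, List.nil_append] at hA
  exact congrArg String.ofList hA
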